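-- pv_equiv track=rewrite | github.com/akashrajkn/akruti | src/preprocess.py | get_msd_dict_each_feature
-- ===== SOURCE A (Python) =====
-- def get_msd_dict_each_feature(msds):
--     '''
--     Converts msds to dictionary where each msd option is a different feature
--     '''
--     msd_size   = 0
--     desc_2_idx = {}
--     idx_2_desc = {}
--
--
--     for msd in msds:
--         for key in msd:
--             if desc_2_idx.get(key) is None:
--                 desc_2_idx[key]      = msd_size
--                 idx_2_desc[msd_size] = key
--                 msd_size            += 1
--
--     desc_2_idx['<unkMSD>'] = msd_size
--     idx_2_desc[msd_size]   = '<unkMSD>'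
--     msd_size              += 1
--
--     return desc_2_idx, idx_2_desc, None
-- ===== SOURCE B (Python) =====
-- def get_msd_dict_each_feature(msds):
--     '''
--     Converts msds to dictionary where each msd option is a different feature
--     '''
--     flat = [key for msd in msds for key in msd]
--     # scan the flattened key stream back to front, overwriting: the surviving
--     # value for each key is its FIRST position in the stream
--     first = {}
--     for pos, key in reversed(list(enumerate(flat))):
--         first[key] = pos
--     # sorting the unique keys by first position recovers first-occurrence order
--     order = sorted(first, key=first.get)
--     order.append('<unkMSD>')
--     desc_2_idx = {key: i for i, key in enumerate(order)}
--     idx_2_desc = {i: key for i, key in enumerate(order)}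
--     return desc_2_idx, idx_2_desc, None
-- ===== Notes on version B (the rewrite author's own statement) =====
-- stated objective: alternative
-- what changed: Replaces A's single stateful pass (counter + per-key membership guard) by a sort-based algorithm: a back-to-front overwrite pass over the flattened keys records each key's first position, sorting the unique keys by that position recovers first-occurrence order, and the two inverse dicts are rebuilt by enumerating the sorted list (plus the unconditional '<unkMSD>' sentinel).
import Mathlib
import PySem

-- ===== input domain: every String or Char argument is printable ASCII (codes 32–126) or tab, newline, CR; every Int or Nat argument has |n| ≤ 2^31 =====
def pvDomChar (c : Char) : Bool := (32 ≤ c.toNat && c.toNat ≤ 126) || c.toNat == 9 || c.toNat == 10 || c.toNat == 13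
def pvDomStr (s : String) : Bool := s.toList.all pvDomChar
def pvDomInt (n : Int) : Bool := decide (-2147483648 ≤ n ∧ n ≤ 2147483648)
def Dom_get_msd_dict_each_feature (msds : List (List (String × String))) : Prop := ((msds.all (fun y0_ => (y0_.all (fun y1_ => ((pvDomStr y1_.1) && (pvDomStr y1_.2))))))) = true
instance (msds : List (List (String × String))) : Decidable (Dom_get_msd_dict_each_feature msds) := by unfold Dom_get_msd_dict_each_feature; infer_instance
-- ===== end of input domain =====

-- B replaces A's stateful guarded numbering loop by a sort-based algorithm: a
-- back-to-front overwrite pass records each key's first position, sorting the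
-- unique keys by that position recovers first-occurrence order, and the two
-- inverse dicts are rebuilt from the sorted list: alternative decomposition.

-- ===== PORT A =====
-- A iterates the keys of each msd dict: on the assoc-list representation that is
-- the ordered dedup of the first components (exact Python dict key iteration).
def get_msd_dict_each_feature (msds : List (List (String × String))) : (List (String × Int)) × (List (Int × String)) × Option String :=
  let st :=
    msds.foldl (fun st msd =>
      (PySem.List.dedup (msd.map Prod.fst)).foldl (fun st key =>
        if st.2.1.get? key = none then
          (st.1 + 1, st.2.1.insert key st.1, st.2.2.insert st.1 key)
        else st) st)
      ((0 : Int), (PySem.Dict.empty : PySem.Dict String Int), (PySem.Dict.empty : PySem.Dict Int String))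
  ((st.2.1.insert "<unkMSD>" st.1).items, (st.2.2.insert st.1 "<unkMSD>").items, none)

-- ===== PORT B =====
-- 'sorted(first, key=first.get)' iterates the dict's keys; first.get k is total
-- on them, ported as getD k 0 (exact: every iterated key is present in first).
def get_msd_dict_each_feature_alt (msds : List (List (String × String))) : (List (String × Int)) × (List (Int × String)) × Option String :=
  let flat := msds.flatMap (fun msd => PySem.List.dedup (msd.map Prod.fst))
  let first :=
    (PySem.List.enumerate flat).reverse.foldl
      (fun (d : PySem.Dict String Int) pk => d.insert pk.2 pk.1) PySem.Dict.empty
  let order := PySem.List.sorted first.keys (fun k => first.getD k 0) ++ ["<unkMSD>"]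
  let desc_2_idx :=
    (PySem.List.enumerate order).foldl
      (fun (d : PySem.Dict String Int) ik => d.insert ik.2 ik.1) PySem.Dict.empty
  let idx_2_desc :=
    (PySem.List.enumerate order).foldl
      (fun (d : PySem.Dict Int String) ik => d.insert ik.1 ik.2) PySem.Dict.empty
  (desc_2_idx.items, idx_2_desc.items, none)

-- ===== PRECONDITION & SPEC =====
def Spec_get_msd_dict_each_feature (msds : List (List (String × String))) (out : (List (String × Int)) × (List (Int × String)) × Option String) : Prop := out = get_msd_dict_each_feature_alt msds
instance (msds : List (List (String × String))) (out : (List (String × Int)) × (List (Int × String)) × Option String) : Decidable (Spec_get_msd_dict_each_feature msds out) := by unfold Spec_get_msd_dict_each_feature; infer_instance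

-- ===== CLAIM (what is proved, stated in full; the proofs are below) =====
def Claim_equal_get_msd_dict_each_feature : Prop := ∀ (msds : List (List (String × String))), Dom_get_msd_dict_each_feature msds → Spec_get_msd_dict_each_feature msds (get_msd_dict_each_feature msds)

-- ===== LEMMAS AND PROOFS =====

-- A's guarded step and the unconditional "append a fresh key" step
def pvAStep (st : Int × PySem.Dict String Int × PySem.Dict Int String) (key : String) :
    Int × PySem.Dict String Int × PySem.Dict Int String :=
  if st.2.1.get? key = none then (st.1 + 1, st.2.1.insert key st.1, st.2.2.insert st.1 key) else st

def pvUStep (st : Int × PySem.Dict String Int × PySem.Dict Int String) (key : String) :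
    Int × PySem.Dict String Int × PySem.Dict Int String :=
  (st.1 + 1, st.2.1.insert key st.1, st.2.2.insert st.1 key)

def pvBuild (U : List String) : Int × PySem.Dict String Int × PySem.Dict Int String :=
  U.foldl pvUStep ((0 : Int), PySem.Dict.empty, PySem.Dict.empty)

theorem pvBuild_append (U : List String) (k : String) :
    pvBuild (U ++ [k]) = pvUStep (pvBuild U) k := by
  simp [pvBuild, List.foldl_append]

theorem pvBuild_fst_aux (U : List String) :
    ∀ st, (U.foldl pvUStep st).1 = st.1 + U.length := by
  induction U with
  | nil => simp
  | cons k U ih => intro st; simp [List.foldl_cons, ih, pvUStep]; ring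

theorem pvBuild_fst (U : List String) : (pvBuild U).1 = (U.length : Int) := by
  simpa using pvBuild_fst_aux U ((0 : Int), PySem.Dict.empty, PySem.Dict.empty)

theorem pvBuild_get?_none (U : List String) (k : String) :
    (pvBuild U).2.1.get? k = none ↔ k ∉ U := by
  induction U using List.reverseRecOn with
  | nil => simp [pvBuild, PySem.Dict.get?_empty]
  | append_singleton U x ih =>
    rw [pvBuild_append]
    simp only [pvUStep]
    rw [PySem.Dict.get?_insert]
    by_cases hx : k = x
    · subst hx; simp
    · simp [hx, ih]

-- A's guarded loop over K extends the unconditional build over the running dedup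
theorem pvMain (K : List String) : ∀ (U : List String), U.Nodup →
    K.foldl pvAStep (pvBuild U) = pvBuild (PySem.Set.update U K) := by
  induction K with
  | nil => intro U _; simp [PySem.Set.update]
  | cons k K ih =>
    intro U hU
    rw [List.foldl_cons, PySem.Set.update_cons]
    by_cases hk : k ∈ U
    · have hget : ¬ ((pvBuild U).2.1.get? k = none) := by
        rw [pvBuild_get?_none]; simpa using hk
      have hadd : PySem.Set.add U k = U := by
        simp [PySem.Set.add, PySem.Set.contains, hk]
      rw [hadd]
      have : pvAStep (pvBuild U) k = pvBuild U := by simp [pvAStep, hget]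
      rw [this]; exact ih U hU
    · have hget : (pvBuild U).2.1.get? k = none := by
        rw [pvBuild_get?_none]; exact hk
      have hadd : PySem.Set.add U k = U ++ [k] := by
        simp [PySem.Set.add, PySem.Set.contains, hk]
      have hstep : pvAStep (pvBuild U) k = pvBuild (U ++ [k]) := by
        rw [pvBuild_append]; simp [pvAStep, pvUStep, hget]
      rw [hadd, hstep]
      exact ih (U ++ [k]) (hU.append (List.nodup_singleton k) (by simp [List.disjoint_singleton, hk]))

theorem pvFoldl_flatMap {α β γ : Type} (f : α → List β) (g : γ → β → γ) (l : List α) :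
    ∀ (st : γ), l.foldl (fun st x => (f x).foldl g st) st = (l.flatMap f).foldl g st := by
  induction l with
  | nil => intro st; simp
  | cons x l ih => intro st; simp [List.foldl_append, ih]

-- B's back-to-front overwrite pass
def pvIns (d : PySem.Dict String Int) (pk : Int × String) : PySem.Dict String Int :=
  d.insert pk.2 pk.1

theorem pvRev_cons (x : String) (xs : List String) (s : Int) (d : PySem.Dict String Int) :
    (PySem.List.enumerate (x :: xs) s).reverse.foldl pvIns d
      = ((PySem.List.enumerate xs (s + 1)).reverse.foldl pvIns d).insert x s := by
  simp [PySem.List.enumerate_cons, List.foldl_append, pvIns]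

theorem pvFirst_get? (flat : List String) : ∀ (s : Int) (d : PySem.Dict String Int) (k : String),
    ((PySem.List.enumerate flat s).reverse.foldl pvIns d).get? k
      = if k ∈ flat then some (s + (flat.idxOf k : Int)) else d.get? k := by
  induction flat with
  | nil => intro s d k; simp [PySem.List.enumerate_nil]
  | cons x xs ih =>
    intro s d k
    rw [pvRev_cons, PySem.Dict.get?_insert, ih]
    by_cases hx : k = x
    · subst hx; simp
    · rw [List.idxOf_cons_ne xs (Ne.symm hx)]
      by_cases hm : k ∈ xs
      · simp [hx, hm]; ring
      · simp [hx, hm]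

theorem pvFirst_keys (flat : List String) (s : Int) :
    ((PySem.List.enumerate flat s).reverse.foldl pvIns PySem.Dict.empty).keys
      = PySem.List.dedup flat.reverse := by
  have h := PySem.Dict.keys_foldl_insert_key (ν := Int)
      ((PySem.List.enumerate flat s).reverse) (fun pk => pk.2) (fun _ pk => pk.1)
      PySem.Dict.empty
  have hmap : ((PySem.List.enumerate flat s).reverse.map (fun pk => pk.2)) = flat.reverse := by
    rw [List.map_reverse]
    congr 1
    exact PySem.List.map_snd_enumerate flat s
  simpa [pvIns, hmap, PySem.Dict.keys_empty, PySem.Set.update_empty] using h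

-- the unique keys are strictly increasing in first-occurrence position
theorem pvDedup_pairwise_idxOf (flat : List String) :
    (PySem.List.dedup flat).Pairwise (fun a b => flat.idxOf a < flat.idxOf b) := by
  induction flat with
  | nil => simp
  | cons x xs ih =>
    have hded : PySem.List.dedup (x :: xs) = x :: (PySem.Set.discard (PySem.List.dedup xs) x) := by
      simp [PySem.List.dedup_eq_ofList, PySem.Set.ofList_cons]
    rw [hded]
    constructor
    · intro b hb
      have hb' := (PySem.Set.mem_discard _ _ _).1 hb
      rw [List.idxOf_cons_self, List.idxOf_cons_ne xs (Ne.symm hb'.2)]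
      exact Nat.succ_pos _
    · have hsub : (PySem.Set.discard (PySem.List.dedup xs) x).Sublist (PySem.List.dedup xs) := by
        simp [PySem.Set.discard, List.filter_sublist]
      refine List.Pairwise.imp_of_mem ?_ (List.Pairwise.sublist hsub ih)
      intro a b ha hb hlt
      have ha' := (PySem.Set.mem_discard _ _ _).1 ha
      have hb' := (PySem.Set.mem_discard _ _ _).1 hb
      rw [List.idxOf_cons_ne xs (Ne.symm ha'.2), List.idxOf_cons_ne xs (Ne.symm hb'.2)]
      exact Nat.succ_lt_succ hlt

-- sorting the dict's keys by recorded first position is exactly the ordered dedup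
theorem pvSorted_eq_dedup (flat : List String) :
    PySem.List.sorted
      ((PySem.List.enumerate flat).reverse.foldl pvIns PySem.Dict.empty).keys
      (fun k => ((PySem.List.enumerate flat).reverse.foldl pvIns PySem.Dict.empty).getD k 0)
      = PySem.List.dedup flat := by
  apply PySem.List.sorted_eq_of_perm_of_pairwise_lt
  · rw [pvFirst_keys flat 0]
    rw [List.perm_ext_iff_of_nodup (PySem.List.nodup_dedup flat) (PySem.List.nodup_dedup _)]
    intro a; simp
  · refine List.Pairwise.imp_of_mem ?_ (pvDedup_pairwise_idxOf flat)
    intro a b ha hb hlt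
    have ha' : a ∈ flat := (PySem.List.mem_dedup _ _).1 ha
    have hb' : b ∈ flat := (PySem.List.mem_dedup _ _).1 hb
    rw [PySem.Dict.getD_eq_get?_getD, PySem.Dict.getD_eq_get?_getD,
        pvFirst_get? flat 0 PySem.Dict.empty a, pvFirst_get? flat 0 PySem.Dict.empty b]
    simp [ha', hb']
    exact_mod_cast hlt

-- the two rebuild passes over the ordered key list produce pvBuild's dicts
def pvI2DStep (d : PySem.Dict Int String) (ik : Int × String) : PySem.Dict Int String :=
  d.insert ik.1 ik.2

theorem pvD2IFold (L : List String) :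
    (PySem.List.enumerate L).foldl pvIns PySem.Dict.empty = (pvBuild L).2.1 := by
  induction L using List.reverseRecOn with
  | nil => simp [pvBuild, PySem.List.enumerate]
  | append_singleton L x ih =>
    rw [PySem.List.enumerate_append, List.foldl_append, ih, pvBuild_append]
    simp [pvIns, pvUStep, PySem.List.enumerate, pvBuild_fst]

theorem pvI2DFold (L : List String) :
    (PySem.List.enumerate L).foldl pvI2DStep PySem.Dict.empty = (pvBuild L).2.2 := by
  induction L using List.reverseRecOn with
  | nil => simp [pvBuild, PySem.List.enumerate]
  | append_singleton L x ih =>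
    rw [PySem.List.enumerate_append, List.foldl_append, ih, pvBuild_append]
    simp [pvI2DStep, pvUStep, PySem.List.enumerate, pvBuild_fst]

-- ===== VERDICT (by name: the statement is the Claim_ definition above) =====
theorem get_msd_dict_each_feature_spec : Claim_equal_get_msd_dict_each_feature := by
  intro msds _
  unfold Spec_get_msd_dict_each_feature get_msd_dict_each_feature get_msd_dict_each_feature_alt
  have hnest :
      msds.foldl (fun st msd =>
        (PySem.List.dedup (msd.map Prod.fst)).foldl (fun st key =>
          if st.2.1.get? key = none then
            (st.1 + 1, st.2.1.insert key st.1, st.2.2.insert st.1 key)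
          else st) st)
        ((0 : Int), (PySem.Dict.empty : PySem.Dict String Int), (PySem.Dict.empty : PySem.Dict Int String))
      = (msds.flatMap (fun msd => PySem.List.dedup (msd.map Prod.fst))).foldl pvAStep (pvBuild []) := by
    exact pvFoldl_flatMap (fun msd => PySem.List.dedup (msd.map Prod.fst)) pvAStep msds _
  set K := msds.flatMap (fun msd => PySem.List.dedup (msd.map Prod.fst)) with hK
  set D := PySem.List.dedup K with hD
  have hst : K.foldl pvAStep (pvBuild []) = pvBuild D := by
    rw [pvMain K [] (List.nodup_nil)]
    simp [hD, PySem.Set.update_nil_left]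
  have hsorted :
      PySem.List.sorted
        ((PySem.List.enumerate K).reverse.foldl pvIns PySem.Dict.empty).keys
        (fun k => ((PySem.List.enumerate K).reverse.foldl pvIns PySem.Dict.empty).getD k 0)
        = D := pvSorted_eq_dedup K
  have hA1 : (pvBuild D).2.1.insert "<unkMSD>" (pvBuild D).1 = (pvBuild (D ++ ["<unkMSD>"])).2.1 := by
    rw [pvBuild_append]; rfl
  have hA2 : (pvBuild D).2.2.insert (pvBuild D).1 "<unkMSD>" = (pvBuild (D ++ ["<unkMSD>"])).2.2 := by
    rw [pvBuild_append]; rfl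
  simp only [hnest, hst]
  rw [show (fun (d : PySem.Dict String Int) (pk : Int × String) => d.insert pk.2 pk.1) = pvIns from rfl,
      show (fun (d : PySem.Dict Int String) (ik : Int × String) => d.insert ik.1 ik.2) = pvI2DStep from rfl]
  rw [hsorted, hA1, hA2, pvD2IFold, pvI2DFold]
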